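-- pv_equiv track=rewrite | github.com/olaniSiyum/heart-rate-peaks | count_laps.py | count_laps
-- ===== SOURCE A (Python) =====
-- def is_peak_at(data, i, w):
--     # replace this with your code
--     if i < w or i >= len(data) - w:
--         return False
--     if not all(data[i] > data[j] for j in range(i - w, i)):
--         return False
--     if not all(data[i] >= data[j] for j in range(i + 1, i + w + 1)):
--         return False
--     return True
--
-- def count_laps(data, w):
--     peak_count = 0
--     for i in range(len(data)):
--         if is_peak_at(data, i, w):
--             peak_count = peak_count + 1
--             pass
--         pass
--     return peak_count
-- ===== SOURCE B (Python) =====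
-- def _sliding_max(data, w):
--     # maxima of every length-w window, monotonic deque of indices (head pointer instead of popleft)
--     out = []
--     dq = []
--     head = 0
--     for i in range(len(data)):
--         v = data[i]
--         while len(dq) > head and data[dq[-1]] <= v:
--             dq.pop()
--         dq.append(i)
--         if dq[head] + w <= i:
--             head += 1
--         if i + 1 >= w:
--             out.append(data[dq[head]])
--     return out
--
-- def count_laps(data, w):
--     n = len(data)
--     if w <= 0:
--         return n
--     if n < 2 * w + 1:
--         return 0
--     mx = _sliding_max(data, w)
--     count = 0
--     for i in range(w, n - w):
--         if data[i] > mx[i - w] and data[i] >= mx[i + 1]: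
--             count += 1
--     return count
-- ===== Notes on version B (the rewrite author's own statement) =====
-- stated objective: faster
-- what changed: Replaces the per-index O(w) window rescans (is_peak_at with two all() scans for every i) by one O(n) monotonic-deque sliding-window-maximum pass whose maxima list answers both the strict previous-window and the non-strict next-window tests with a single comparison per index.
import Mathlib
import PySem

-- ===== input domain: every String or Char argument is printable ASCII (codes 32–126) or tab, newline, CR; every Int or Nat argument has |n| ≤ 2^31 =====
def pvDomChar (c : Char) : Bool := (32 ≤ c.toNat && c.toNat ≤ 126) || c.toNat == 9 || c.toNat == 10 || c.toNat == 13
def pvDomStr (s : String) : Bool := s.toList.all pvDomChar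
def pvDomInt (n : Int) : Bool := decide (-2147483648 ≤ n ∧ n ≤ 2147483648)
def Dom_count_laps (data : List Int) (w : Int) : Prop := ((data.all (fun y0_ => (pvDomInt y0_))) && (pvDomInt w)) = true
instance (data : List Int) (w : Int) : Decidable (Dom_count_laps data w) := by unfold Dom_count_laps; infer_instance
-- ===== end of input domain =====

-- B replaces A's per-index window rescans by a single monotonic-deque
-- sliding-window-maximum pass; one comparison against the precomputed window
-- maxima then decides each peak (objective: faster).

-- ===== PORT A =====

def is_peak_at (data : List Int) (i : Int) (w : Int) : Bool :=
  if i < w ∨ i ≥ (data.length : Int) - w then false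
  else if ¬ ((PySem.List.pyRange (i - w) i 1).all fun j =>
      decide (PySem.List.pyGetD data i 0 > PySem.List.pyGetD data j 0)) then false
  else if ¬ ((PySem.List.pyRange (i + 1) (i + w + 1) 1).all fun j =>
      decide (PySem.List.pyGetD data i 0 ≥ PySem.List.pyGetD data j 0)) then false
  else true

def count_laps (data : List Int) (w : Int) : Int :=
  (PySem.List.pyRange 0 (data.length : Int) 1).foldl
    (fun peak_count i => if is_peak_at data i w then peak_count + 1 else peak_count) 0

-- ===== PORT B =====
-- Source B: `while len(dq) > head and data[dq[-1]] <= v: dq.pop()`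
def popLoop (data : List Int) (head : Nat) (v : Int) (dq : List Nat) : List Nat :=
  if h : head < dq.length ∧ data.getD (dq.getLast?.getD 0) 0 ≤ v then
    popLoop data head v dq.dropLast
  else dq
termination_by dq.length
decreasing_by
  cases dq with
  | nil => simp at h
  | cons a l => simp [List.length_dropLast]

-- body of Source B's `for i in range(len(data))` loop in _sliding_max; state = (dq, head, out)
def slideStep (data : List Int) (w : Nat) (st : List Nat × Nat × List Int) (i : Nat) :
    List Nat × Nat × List Int :=
  let v := data.getD i 0
  let dq := popLoop data st.2.1 v st.1 ++ [i]
  let head := if dq.getD st.2.1 0 + w ≤ i then st.2.1 + 1 else st.2.1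
  let out := if w ≤ i + 1 then st.2.2 ++ [data.getD (dq.getD head 0) 0] else st.2.2
  (dq, head, out)

-- Source B's _sliding_max
def slidingMax (data : List Int) (w : Nat) : List Int :=
  ((List.range data.length).foldl (slideStep data w) ([], 0, [])).2.2

def count_laps_alt (data : List Int) (w : Int) : Int :=
  let n : Int := (data.length : Int)
  if w ≤ 0 then n
  else if n < 2 * w + 1 then 0
  else
    let mx := slidingMax data w.toNat
    (PySem.List.pyRange w (n - w) 1).foldl
      (fun count i =>
        if PySem.List.pyGetD data i 0 > PySem.List.pyGetD mx (i - w) 0 ∧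
           PySem.List.pyGetD data i 0 ≥ PySem.List.pyGetD mx (i + 1) 0
        then count + 1 else count) 0

-- ===== PRECONDITION & SPEC =====
def Spec_count_laps (data : List Int) (w : Int) (out : Int) : Prop := out = count_laps_alt data w
instance (data : List Int) (w : Int) (out : Int) : Decidable (Spec_count_laps data w out) := by unfold Spec_count_laps; infer_instance

-- ===== CLAIM (what is proved, stated in full; the proofs are below) =====
def Claim_equal_count_laps : Prop := ∀ (data : List Int) (w : Int), Dom_count_laps data w → Spec_count_laps data w (count_laps data w)

-- ===== LEMMAS AND PROOFS =====

-- `domB data t j` : data[j] strictly dominates every later value up to index t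
def domB (data : List Int) (t j : Nat) : Bool :=
  (List.range' (j+1) (t - j)).all fun k => decide (data.getD k 0 < data.getD j 0)

-- the in-window part of the deque after processing indices 0..m-1
def dqA (data : List Int) (w m : Nat) : List Nat :=
  (List.range m).filter fun j => decide (m - 1 < j + w) && domB data (m-1) j

-- the deque just after popping and appending at step m (before eviction)
def midA (data : List Int) (w m : Nat) : List Nat :=
  (List.range (m+1)).filter fun j => decide (m - 1 < j + w) && domB data m j

-- the output list after processing indices 0..m-1
def outA (data : List Int) (w m : Nat) : List Int :=
  (List.range (m + 1 - w)).map fun k => data.getD ((dqA data w (k + w)).headD 0) 0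

lemma popLoop_spec (data : List Int) (v : Int) (stale : List Nat) (l : List Nat)
    (hl : l.Pairwise (fun a b => data.getD b 0 < data.getD a 0)) :
    popLoop data stale.length v (stale ++ l) =
      stale ++ l.filter (fun j => decide (v < data.getD j 0)) := by
  induction l using List.reverseRecOn with
  | nil => rw [popLoop]; simp
  | append_singleton l a ih =>
    have hlen : stale.length < (stale ++ (l ++ [a])).length := by simp
    have hlast : (stale ++ (l ++ [a])).getLast? = some a := by
      rw [← List.append_assoc]; exact List.getLast?_concat
    have hdrop : (stale ++ (l ++ [a])).dropLast = stale ++ l := by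
      rw [← List.append_assoc]; exact List.dropLast_concat
    by_cases hv : data.getD a 0 ≤ v
    · rw [popLoop, dif_pos ⟨hlen, by rw [hlast, Option.getD_some]; exact hv⟩, hdrop,
        ih (hl.sublist (by simp))]
      have hfa : (decide (v < data.getD a 0)) = false := decide_eq_false (by omega)
      rw [List.filter_append, List.filter_singleton, hfa]
      simp
    · rw [popLoop, dif_neg]
      · have h1 : l.filter (fun j => decide (v < data.getD j 0)) = l := by
          rw [List.filter_eq_self]
          intro x hx
          have hax := (List.pairwise_append.mp hl).2.2 x hx a (by simp)
          exact decide_eq_true (by omega)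
        rw [List.filter_append, List.filter_singleton, h1,
          decide_eq_true (show v < data.getD a 0 by omega)]
        simp
      · intro hc
        rw [hlast, Option.getD_some] at hc
        exact hv hc.2

lemma domB_iff {data : List Int} {t j : Nat} :
    (List.range' (j+1) (t - j)).all (fun k => decide (data.getD k 0 < data.getD j 0)) = true ↔
      ∀ k, j < k → k ≤ t → data.getD k 0 < data.getD j 0 := by
  simp only [List.all_eq_true, List.mem_range'_1, decide_eq_true_eq]
  constructor
  · intro h k hk1 hk2; exact h k ⟨by omega, by omega⟩
  · rintro h k ⟨h1, h2⟩; exact h k (by omega) (by omega)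

lemma domB_succ (data : List Int) (j m : Nat) (hj : j < m) :
    domB data m j = (domB data (m-1) j && decide (data.getD m 0 < data.getD j 0)) := by
  unfold domB
  have h1 : m - j = (m - 1 - j) + 1 := by omega
  have h2 : j + 1 + (m - 1 - j) = m := by omega
  rw [h1, List.range'_1_concat, h2, List.all_append]
  simp

lemma mem_dqA {data : List Int} {w m j : Nat} :
    j ∈ dqA data w m ↔ j < m ∧ m - 1 < j + w ∧ domB data (m-1) j = true := by
  simp [dqA, List.mem_filter, List.mem_range]

lemma mem_midA {data : List Int} {w m j : Nat} :
    j ∈ midA data w m ↔ j < m + 1 ∧ m - 1 < j + w ∧ domB data m j = true := by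
  simp [midA, List.mem_filter, List.mem_range]

lemma dqA_sorted (data : List Int) (w m : Nat) : (dqA data w m).Pairwise (· < ·) :=
  List.Pairwise.filter _ List.pairwise_lt_range

lemma midA_sorted (data : List Int) (w m : Nat) : (midA data w m).Pairwise (· < ·) :=
  List.Pairwise.filter _ List.pairwise_lt_range

lemma dqA_dec (data : List Int) (w m : Nat) :
    (dqA data w m).Pairwise (fun a b => data.getD b 0 < data.getD a 0) := by
  refine (dqA_sorted data w m).imp_of_mem ?_
  intro a b ha hb hab
  have h1 := mem_dqA.mp ha
  have h2 := mem_dqA.mp hb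
  exact (domB_iff.mp h1.2.2) b hab (by omega)

-- popped-then-appended deque = midA

lemma pop_append (data : List Int) (w m : Nat) (hw : 1 ≤ w) :
    (dqA data w m).filter (fun j => decide (data.getD m 0 < data.getD j 0)) ++ [m] =
      midA data w m := by
  unfold midA
  rw [List.range_succ, List.filter_append, List.filter_singleton]
  have hm : (decide (m - 1 < m + w) && domB data m m) = true := by
    have : domB data m m = true := by
      unfold domB; simp
    simp [this]; omega
  rw [hm]
  congr 1
  unfold dqA
  rw [List.filter_filter]
  apply List.filter_congr
  intro j hj
  have hjm : j < m := List.mem_range.mp hj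
  rw [domB_succ data j m hjm]
  cases h1 : decide (m - 1 < j + w) <;> cases h2 : domB data (m-1) j <;>
    cases h3 : decide (data.getD m 0 < data.getD j 0) <;> simp_all

lemma dqA_succ_eq_filter_midA (data : List Int) (w m : Nat) :
    dqA data w (m+1) = (midA data w m).filter (fun j => decide (m < j + w)) := by
  unfold dqA midA
  rw [List.filter_filter]
  apply List.filter_congr
  intro j hj
  simp only [Nat.add_sub_cancel]
  cases h1 : domB data m j <;> cases h2 : decide (m < j + w) <;>
    cases h3 : decide (m - 1 < j + w) <;> simp_all <;> omega

lemma m_mem_midA (data : List Int) (w m : Nat) (hw : 1 ≤ w) : m ∈ midA data w m := by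
  rw [mem_midA]
  refine ⟨by omega, by omega, ?_⟩
  unfold domB; simp

-- eviction on the sorted midA: drop-the-head iff the head left the window

lemma evict_midA (data : List Int) (w m : Nat) (hw : 1 ≤ w) (h : Nat) (rest : List Nat)
    (he : midA data w m = h :: rest) :
    dqA data w (m+1) = if h + w ≤ m then rest else h :: rest := by
  rw [dqA_succ_eq_filter_midA, he]
  have hsort := midA_sorted data w m
  rw [he] at hsort
  have hmem : ∀ x ∈ rest, h < x := by
    intro x hx; exact (List.pairwise_cons.mp hsort).1 x hx
  have hwin : ∀ x ∈ rest, m - 1 < x + w := by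
    intro x hx
    have : x ∈ midA data w m := by rw [he]; exact List.mem_cons_of_mem _ hx
    exact (mem_midA.mp this).2.1
  have hhw : m - 1 < h + w := by
    have : h ∈ midA data w m := by rw [he]; exact List.mem_cons_self
    exact (mem_midA.mp this).2.1
  by_cases hc : h + w ≤ m
  · rw [if_pos hc, List.filter_cons, decide_eq_false (by omega)]
    simp only [Bool.false_eq_true, if_false]
    rw [List.filter_eq_self]
    intro x hx
    exact decide_eq_true (by have := hmem x hx; omega)
  · rw [if_neg hc, List.filter_cons, decide_eq_true (by omega)]
    simp only [if_true]
    congr 1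
    rw [List.filter_eq_self]
    intro x hx
    exact decide_eq_true (by have := hmem x hx; have := hwin x hx; omega)

lemma outA_succ_le (data : List Int) (w m : Nat) (hw : w ≤ m + 1) :
    outA data w (m+1) = outA data w m ++ [data.getD ((dqA data w (m+1)).headD 0) 0] := by
  unfold outA
  rw [show m + 1 + 1 - w = (m + 1 - w) + 1 by omega, List.range_succ, List.map_append]
  simp only [List.map_cons, List.map_nil]
  rw [show m + 1 - w + w = m + 1 by omega]

lemma outA_succ_gt (data : List Int) (w m : Nat) (hw : m + 1 < w) :
    outA data w (m+1) = outA data w m := by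
  unfold outA
  rw [show m + 1 + 1 - w = 0 by omega, show m + 1 - w = 0 by omega]

lemma getD_append_mid (stale : List Nat) (l : List Nat) (k : Nat) :
    (stale ++ l).getD (stale.length + k) 0 = l.getD k 0 := by
  simp [List.getD_eq_getElem?_getD, List.getElem?_append_right (by omega : stale.length ≤ stale.length + k)]

lemma fold_inv (data : List Int) (w : Nat) (hw : 1 ≤ w) (m : Nat) :
    ∃ stale : List Nat,
      (List.range m).foldl (slideStep data w) ([], 0, []) =
        (stale ++ dqA data w m, stale.length, outA data w m) := by
  induction m with
  | zero =>
    refine ⟨[], ?_⟩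
    simp [dqA, outA, show 1 - w = 0 by omega]
  | succ m ih =>
    obtain ⟨stale, hst⟩ := ih
    rw [List.range_succ, List.foldl_append, hst]
    simp only [List.foldl_cons, List.foldl_nil]
    obtain ⟨h, rest, he⟩ := List.exists_cons_of_ne_nil
      (show midA data w m ≠ [] from fun hE => by
        have := m_mem_midA data w m hw; rw [hE] at this; simp at this)
    have hpop : popLoop data stale.length (data.getD m 0) (stale ++ dqA data w m) ++ [m] =
        stale ++ (h :: rest) := by
      rw [popLoop_spec data _ stale _ (dqA_dec data w m), List.append_assoc,
        pop_append data w m hw, he]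
    have hget : (stale ++ (h :: rest)).getD (stale.length) 0 = h := by
      have := getD_append_mid stale (h :: rest) 0
      simpa using this
    unfold slideStep
    simp only [hpop, hget]
    by_cases hc : h + w ≤ m
    · rw [if_pos hc]
      have hdq : dqA data w (m+1) = rest := by rw [evict_midA data w m hw h rest he, if_pos hc]
      have hout : (if w ≤ m + 1 then
            outA data w m ++ [data.getD ((stale ++ h :: rest).getD (stale.length + 1) 0) 0]
          else outA data w m) = outA data w (m+1) := by
        by_cases ho : w ≤ m + 1
        · rw [if_pos ho, outA_succ_le data w m ho, hdq]
          have h1 := getD_append_mid stale (h :: rest) 1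
          simp only [List.getD_cons_succ] at h1
          rw [h1]
          cases rest <;> simp [List.headD]
        · rw [if_neg ho, outA_succ_gt data w m (by omega)]
      refine ⟨stale ++ [h], ?_⟩
      rw [hout, hdq, show stale ++ h :: rest = (stale ++ [h]) ++ rest by simp]
      simp
    · rw [if_neg hc]
      have hdq : dqA data w (m+1) = h :: rest := by
        rw [evict_midA data w m hw h rest he, if_neg hc]
      have hout : (if w ≤ m + 1 then
            outA data w m ++ [data.getD ((stale ++ h :: rest).getD stale.length 0) 0]
          else outA data w m) = outA data w (m+1) := by
        by_cases ho : w ≤ m + 1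
        · rw [if_pos ho, outA_succ_le data w m ho, hdq, hget]
          simp [List.headD]
        · rw [if_neg ho, outA_succ_gt data w m (by omega)]
      refine ⟨stale, ?_⟩
      rw [hout, hdq]

lemma dqA_ne_nil (data : List Int) (w t : Nat) (hw : 1 ≤ w) (ht : 1 ≤ t) :
    dqA data w t ≠ [] := by
  intro hE
  have : t - 1 ∈ dqA data w t := by
    rw [mem_dqA]
    refine ⟨by omega, by omega, ?_⟩
    unfold domB; simp
  rw [hE] at this; simp at this

lemma maxw (data : List Int) (w t : Nat) (hw : 1 ≤ w) (ht : 1 ≤ t) :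
    ((dqA data w t).headD 0 < t ∧ t - 1 < (dqA data w t).headD 0 + w) ∧
      ∀ j, t - 1 < j + w → j ≤ t - 1 →
        data.getD j 0 ≤ data.getD ((dqA data w t).headD 0) 0 := by
  obtain ⟨h, rest, he⟩ := List.exists_cons_of_ne_nil (dqA_ne_nil data w t hw ht)
  rw [he]
  simp only [List.headD_cons]
  have hmemh : h ∈ dqA data w t := by rw [he]; exact List.mem_cons_self
  have hh := mem_dqA.mp hmemh
  refine ⟨⟨hh.1, hh.2.1⟩, ?_⟩
  have hmin : ∀ x ∈ dqA data w t, h ≤ x := by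
    intro x hx
    rw [he] at hx
    rcases List.mem_cons.mp hx with rfl | hx'
    · exact le_refl _
    · have hs := dqA_sorted data w t
      rw [he] at hs
      exact le_of_lt ((List.pairwise_cons.mp hs).1 x hx')
  -- strong induction on t - 1 - j
  suffices key : ∀ d j, t - 1 - j = d → t - 1 < j + w → j ≤ t - 1 →
      data.getD j 0 ≤ data.getD h 0 by
    intro j hj1 hj2; exact key (t - 1 - j) j rfl hj1 hj2
  intro d
  induction d using Nat.strong_induction_on with
  | _ d ih =>
    intro j hd hj1 hj2
    by_cases hmem : j ∈ dqA data w t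
    · rcases (List.mem_cons.mp (he ▸ hmem)) with rfl | hj'
      · exact le_refl _
      · have hs := dqA_sorted data w t
        rw [he] at hs
        have hlt : h < j := (List.pairwise_cons.mp hs).1 j hj'
        exact le_of_lt ((domB_iff.mp hh.2.2) j hlt (by omega))
    · have hdom : domB data (t-1) j = false := by
        cases hdb : domB data (t-1) j
        · rfl
        · exact absurd (mem_dqA.mpr ⟨by omega, hj1, hdb⟩) hmem
      have hex : ∃ k, j < k ∧ k ≤ t - 1 ∧ data.getD j 0 ≤ data.getD k 0 := by
        by_contra hno
        push Not at hno
        have hT : domB data (t-1) j = true :=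
          domB_iff.mpr (fun k hk1 hk2 => by have := hno k hk1 hk2; omega)
        simp [hT] at hdom
      obtain ⟨k, hk1, hk2, hk3⟩ := hex
      have hkle := ih (t - 1 - k) (by omega) k rfl (by omega) hk2
      omega

lemma foldl_count_one (l : List Int) : ∀ (c : Int), l.foldl (fun c _ => c + 1) c = c + l.length := by
  induction l with
  | nil => simp
  | cons x xs ih => intro c; simp [ih]; omega

lemma slidingMax_eq (data : List Int) (w : Nat) (hw : 1 ≤ w) :
    slidingMax data w = outA data w data.length := by
  obtain ⟨stale, hst⟩ := fold_inv data w hw data.length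
  unfold slidingMax
  rw [hst]

lemma A_w_nonpos (data : List Int) (w : Int) (hw : w ≤ 0) :
    count_laps data w = (data.length : Int) := by
  unfold count_laps
  have hall : ∀ c : Int, ∀ i ∈ PySem.List.pyRange 0 (data.length : Int) 1,
      (if is_peak_at data i w then c + 1 else c) = c + 1 := by
    intro c i hi
    obtain ⟨h0, h1⟩ := PySem.List.mem_pyRange_one.mp hi
    have hp : is_peak_at data i w = true := by
      unfold is_peak_at
      rw [if_neg (not_or.mpr ⟨by omega, by omega⟩)]
      rw [PySem.List.pyRange_one_eq_nil (by omega : i ≤ i - w),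
          PySem.List.pyRange_one_eq_nil (by omega : i + w + 1 ≤ i + 1)]
      simp
    rw [hp]; simp
  rw [List.foldl_ext _ (fun (c : Int) (_ : Int) => c + 1) 0 hall, foldl_count_one,
    PySem.List.length_pyRange_one]
  omega

lemma A_small (data : List Int) (w : Int) (hw : 1 ≤ w) (hn : (data.length : Int) < 2 * w + 1) :
    count_laps data w = 0 := by
  unfold count_laps
  have hall : ∀ c : Int, ∀ i ∈ PySem.List.pyRange 0 (data.length : Int) 1,
      (if is_peak_at data i w then c + 1 else c) = c := by
    intro c i hi
    obtain ⟨h0, h1⟩ := PySem.List.mem_pyRange_one.mp hi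
    have hp : is_peak_at data i w = false := by
      unfold is_peak_at
      rw [if_pos]
      by_cases hc : i < w
      · exact Or.inl hc
      · exact Or.inr (by omega)
    rw [hp]; simp
  rw [List.foldl_ext _ (fun (c : Int) (_ : Int) => c) 0 hall, List.foldl_fixed]

lemma peak_iff (data : List Int) (w i : Int) (hw : 1 ≤ w)
    (hn : 2 * w + 1 ≤ (data.length : Int))
    (h1 : w ≤ i) (h2 : i < (data.length : Int) - w) :
    (is_peak_at data i w = true) ↔
      (PySem.List.pyGetD data i 0 > PySem.List.pyGetD (slidingMax data w.toNat) (i - w) 0 ∧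
       PySem.List.pyGetD data i 0 ≥ PySem.List.pyGetD (slidingMax data w.toNat) (i + 1) 0) := by
  have hwn : ((w.toNat : Int)) = w := Int.toNat_of_nonneg (by omega)
  have hii : ((i.toNat : Int)) = i := Int.toNat_of_nonneg (by omega)
  have hDi : PySem.List.pyGetD data i 0 = data.getD i.toNat 0 := by
    rw [← hii, PySem.List.pyGetD_natCast, Int.toNat_natCast]
  have hm1 := maxw data w.toNat i.toNat (by omega) (by omega)
  have hm2 := maxw data w.toNat (i.toNat + 1 + w.toNat) (by omega) (by omega)
  have hR1 : PySem.List.pyGetD (slidingMax data w.toNat) (i - w) 0 =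
      data.getD ((dqA data w.toNat i.toNat).headD 0) 0 := by
    rw [slidingMax_eq data w.toNat (by omega),
      show i - w = ((i.toNat - w.toNat : Nat) : Int) by omega,
      PySem.List.pyGetD_natCast]
    unfold outA
    rw [PySem.List.getD_map_range _ _ _ _ (by omega),
      show i.toNat - w.toNat + w.toNat = i.toNat by omega]
  have hR2 : PySem.List.pyGetD (slidingMax data w.toNat) (i + 1) 0 =
      data.getD ((dqA data w.toNat (i.toNat + 1 + w.toNat)).headD 0) 0 := by
    rw [slidingMax_eq data w.toNat (by omega),
      show i + 1 = ((i.toNat + 1 : Nat) : Int) by omega,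
      PySem.List.pyGetD_natCast]
    unfold outA
    rw [PySem.List.getD_map_range _ _ _ _ (by omega)]
  have iff1 : ((PySem.List.pyRange (i - w) i 1).all fun j =>
        decide (PySem.List.pyGetD data i 0 > PySem.List.pyGetD data j 0)) = true ↔
      (data.getD i.toNat 0 > data.getD ((dqA data w.toNat i.toNat).headD 0) 0) := by
    rw [List.all_eq_true]
    constructor
    · intro hall
      have h5 := hall (((dqA data w.toNat i.toNat).headD 0 : Nat) : Int)
        (PySem.List.mem_pyRange_one.mpr ⟨by omega, by omega⟩)
      rw [PySem.List.pyGetD_natCast, hDi] at h5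
      simpa using h5
    · intro hgt j hj
      obtain ⟨hj1, hj2⟩ := PySem.List.mem_pyRange_one.mp hj
      have hwin := hm1.2 j.toNat (by omega) (by omega)
      rw [decide_eq_true_eq, hDi, show j = ((j.toNat : Nat) : Int) by omega,
        PySem.List.pyGetD_natCast]
      omega
  have iff2 : ((PySem.List.pyRange (i + 1) (i + w + 1) 1).all fun j =>
        decide (PySem.List.pyGetD data i 0 ≥ PySem.List.pyGetD data j 0)) = true ↔
      (data.getD i.toNat 0 ≥ data.getD ((dqA data w.toNat (i.toNat + 1 + w.toNat)).headD 0) 0) := by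
    rw [List.all_eq_true]
    constructor
    · intro hall
      have h5 := hall (((dqA data w.toNat (i.toNat + 1 + w.toNat)).headD 0 : Nat) : Int)
        (PySem.List.mem_pyRange_one.mpr ⟨by omega, by omega⟩)
      rw [PySem.List.pyGetD_natCast, hDi] at h5
      simpa using h5
    · intro hge j hj
      obtain ⟨hj1, hj2⟩ := PySem.List.mem_pyRange_one.mp hj
      have hwin := hm2.2 j.toNat (by omega) (by omega)
      rw [decide_eq_true_eq, hDi, show j = ((j.toNat : Nat) : Int) by omega,
        PySem.List.pyGetD_natCast]
      omega
  rw [hR1, hR2, hDi]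
  unfold is_peak_at
  rw [if_neg (not_or.mpr ⟨by omega, by omega⟩)]
  rcases hc1 : (PySem.List.pyRange (i - w) i 1).all fun j =>
      decide (PySem.List.pyGetD data i 0 > PySem.List.pyGetD data j 0) with _ | _
  · rw [if_pos (by simp)]
    exact iff_of_false (by simp) (fun hP => by rw [hc1] at iff1; simpa using iff1.mpr hP.1)
  · rcases hc2 : (PySem.List.pyRange (i + 1) (i + w + 1) 1).all fun j =>
        decide (PySem.List.pyGetD data i 0 ≥ PySem.List.pyGetD data j 0) with _ | _
    · rw [if_neg (by simp), if_pos (by simp)]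
      exact iff_of_false (by simp) (fun hP => by rw [hc2] at iff2; simpa using iff2.mpr hP.2)
    · rw [if_neg (by simp), if_neg (by simp)]
      exact iff_of_true rfl ⟨iff1.mp hc1, iff2.mp hc2⟩

lemma main_eq (data : List Int) (w : Int) (hw : 1 ≤ w)
    (hn : 2 * w + 1 ≤ (data.length : Int)) :
    count_laps data w = count_laps_alt data w := by
  unfold count_laps
  rw [PySem.List.pyRange_one_append 0 w (data.length : Int) (by omega) (by omega),
    List.foldl_append,
    PySem.List.pyRange_one_append w ((data.length : Int) - w) (data.length : Int)
      (by omega) (by omega),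
    List.foldl_append]
  have leg1 : (PySem.List.pyRange 0 w 1).foldl
      (fun (peak_count : Int) (i : Int) => if is_peak_at data i w then peak_count + 1 else peak_count) (0 : Int) = 0 := by
    have he : (PySem.List.pyRange 0 w 1).foldl
        (fun (peak_count : Int) (i : Int) => if is_peak_at data i w then peak_count + 1 else peak_count) (0 : Int) =
        (PySem.List.pyRange 0 w 1).foldl (fun (c : Int) (_ : Int) => c) (0 : Int) := by
      apply List.foldl_ext
      intro c i hi
      obtain ⟨h0, h1⟩ := PySem.List.mem_pyRange_one.mp hi
      rw [show is_peak_at data i w = false by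
        unfold is_peak_at; rw [if_pos (Or.inl h1)]]
      simp
    rw [he, List.foldl_fixed]
  rw [leg1]
  have leg3 : ∀ c : Int, (PySem.List.pyRange ((data.length : Int) - w) (data.length : Int) 1).foldl
      (fun (peak_count : Int) (i : Int) => if is_peak_at data i w then peak_count + 1 else peak_count) c = c := by
    intro c
    have he : (PySem.List.pyRange ((data.length : Int) - w) (data.length : Int) 1).foldl
        (fun (peak_count : Int) (i : Int) => if is_peak_at data i w then peak_count + 1 else peak_count) c =
        (PySem.List.pyRange ((data.length : Int) - w) (data.length : Int) 1).foldl
          (fun (c : Int) (_ : Int) => c) c := by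
      apply List.foldl_ext
      intro c' i hi
      obtain ⟨h0, h1⟩ := PySem.List.mem_pyRange_one.mp hi
      rw [show is_peak_at data i w = false by
        unfold is_peak_at; rw [if_pos (Or.inr (by omega))]]
      simp
    rw [he, List.foldl_fixed]
  rw [leg3]
  have hmid : (PySem.List.pyRange w ((data.length : Int) - w) 1).foldl
      (fun (peak_count : Int) (i : Int) => if is_peak_at data i w then peak_count + 1 else peak_count) (0 : Int) =
      (PySem.List.pyRange w ((data.length : Int) - w) 1).foldl
        (fun (count : Int) (i : Int) =>
          if PySem.List.pyGetD data i 0 > PySem.List.pyGetD (slidingMax data w.toNat) (i - w) 0 ∧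
             PySem.List.pyGetD data i 0 ≥ PySem.List.pyGetD (slidingMax data w.toNat) (i + 1) 0
          then count + 1 else count) 0 := by
    apply List.foldl_ext
    intro c i hi
    obtain ⟨h0, h1⟩ := PySem.List.mem_pyRange_one.mp hi
    simp only [peak_iff data w i hw hn h0 h1]
  rw [hmid]
  unfold count_laps_alt
  rw [if_neg (by omega), if_neg (by omega)]

-- ===== VERDICT (by name: the statement is the Claim_ definition above) =====
theorem count_laps_spec : Claim_equal_count_laps := by
  intro data w _
  unfold Spec_count_laps
  by_cases h0 : w ≤ 0
  · rw [A_w_nonpos data w h0]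
    unfold count_laps_alt
    rw [if_pos h0]
  · by_cases hsmall : (data.length : Int) < 2 * w + 1
    · rw [A_small data w (by omega) hsmall]
      unfold count_laps_alt
      rw [if_neg h0, if_pos hsmall]
    · exact main_eq data w (by omega) (by omega)
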